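-- pv_equiv track=rewrite | github.com/honzabilek4/artificial-intelligence-examples | 4.2_17.py | goes_before
-- ===== SOURCE A (Python) =====
-- precedence = dict(
--     t1=["t4", "t5"],
--     t2=["t4", "t5"],
--     t3=["t5", "t6", "t7"])
--
-- def goes_before(T1, T2):
--     if T1 in precedence:
--         if T2 in precedence[T1]:
--             return True
--         for T in precedence[T1]:
--             if goes_before(T, T2):
--                 return True
--     return False
-- ===== SOURCE B (Python) =====
-- precedence = dict(
--     t1=["t4", "t5"],
--     t2=["t4", "t5"],
--     t3=["t5", "t6", "t7"])
--
-- def goes_before(T1, T2):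
--     # iterative worklist instead of recursion; no visited set (fixed graph is acyclic)
--     stack = list(precedence.get(T1, []))
--     while stack:
--         node = stack.pop()
--         if node == T2:
--             return True
--         stack.extend(precedence.get(node, []))
--     return False
-- ===== Notes on version B (the rewrite author's own statement) =====
-- stated objective: alternative
-- what changed: The recursive DFS (membership check plus recursive calls per child) is replaced by an iterative worklist traversal with an explicit stack and no recursion.
import Mathlib
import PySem

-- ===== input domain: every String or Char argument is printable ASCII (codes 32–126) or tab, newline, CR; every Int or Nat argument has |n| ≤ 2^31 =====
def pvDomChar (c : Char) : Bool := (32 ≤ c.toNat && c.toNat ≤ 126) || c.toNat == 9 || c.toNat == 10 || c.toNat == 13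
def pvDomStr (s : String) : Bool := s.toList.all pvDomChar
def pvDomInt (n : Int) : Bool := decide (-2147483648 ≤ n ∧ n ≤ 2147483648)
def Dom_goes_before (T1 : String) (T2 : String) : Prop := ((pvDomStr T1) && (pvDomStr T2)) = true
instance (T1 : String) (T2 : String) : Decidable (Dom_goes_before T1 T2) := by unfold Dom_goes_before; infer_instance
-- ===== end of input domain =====

-- B replaces A's recursive DFS by an iterative explicit-stack worklist traversal (alternative decomposition, same cost).

-- ===== PORT A =====
-- the module-level dict 'precedence'
def precedence : PySem.Dict String (List String) :=
  PySem.Dict.mk [("t1", ["t4", "t5"]), ("t2", ["t4", "t5"]), ("t3", ["t5", "t6", "t7"])]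

-- measure for A's recursion: keys of 'precedence' have depth 1, all other strings 0
def pvDepth (s : String) : Nat := if s = "t1" ∨ s = "t2" ∨ s = "t3" then 1 else 0

-- (termination lemma, cited by the port) every successor stored in 'precedence' is not itself a key
theorem pv_child_lt (T1 : String) (lst : List String)
    (h : PySem.Dict.get? precedence T1 = some lst) (t : String) (ht : t ∈ lst) :
    pvDepth t < pvDepth T1 := by
  by_cases h1 : T1 = "t1"
  · subst h1
    rw [(by decide : PySem.Dict.get? precedence "t1" = some ["t4", "t5"])] at h
    injection h with h; subst h
    simp at ht; rcases ht with rfl | rfl <;> decide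
  · by_cases h2 : T1 = "t2"
    · subst h2
      rw [(by decide : PySem.Dict.get? precedence "t2" = some ["t4", "t5"])] at h
      injection h with h; subst h
      simp at ht; rcases ht with rfl | rfl <;> decide
    · by_cases h3 : T1 = "t3"
      · subst h3
        rw [(by decide : PySem.Dict.get? precedence "t3" = some ["t5", "t6", "t7"])] at h
        injection h with h; subst h
        simp at ht; rcases ht with rfl | rfl | rfl <;> decide
      · rw [show PySem.Dict.get? precedence T1 = none by
          simp only [precedence, PySem.Dict.get?_mk_cons, beq_iff_eq]
          rw [if_neg (fun h => h1 h.symm), if_neg (fun h => h2 h.symm),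
            if_neg (fun h => h3 h.symm)]
          rfl] at h
        cases h

-- literal port of A: 'T1 in precedence' + 'T2 in precedence[T1]' + recursive for-loop
def goes_before (T1 : String) (T2 : String) : Bool :=
  match h : PySem.Dict.get? precedence T1 with
  | some lst =>
    if lst.contains T2 then true
    else lst.attach.any (fun t => goes_before t.1 T2)
  | none => false
termination_by pvDepth T1
decreasing_by exact pv_child_lt T1 lst h _ t.2

-- ===== PORT B =====
-- weight for B's worklist measure: a popped key is replaced by cheaper non-key children
def pvWt (s : String) : Nat := if s = "t1" ∨ s = "t2" ∨ s = "t3" then 4 else 1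

-- (termination lemma, cited by the loop) popping a node removes more weight than its children add
theorem pv_children_wt (node : String) :
    ((((PySem.Dict.get? precedence node).getD []).map pvWt).sum) < pvWt node := by
  by_cases h1 : node = "t1"
  · subst h1; decide
  · by_cases h2 : node = "t2"
    · subst h2; decide
    · by_cases h3 : node = "t3"
      · subst h3; decide
      · rw [show PySem.Dict.get? precedence node = none by
          simp only [precedence, PySem.Dict.get?_mk_cons, beq_iff_eq]
          rw [if_neg (fun h => h1 h.symm), if_neg (fun h => h2 h.symm),
            if_neg (fun h => h3 h.symm)]
          rfl]
        simp [pvWt, h1, h2, h3]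

-- B's while-loop: pop the last element, test it, push its children
def goes_before_loop (T2 : String) (stack : List String) : Bool :=
  match hs : stack.getLast? with
  | none => false
  | some node =>
    if node == T2 then true
    else goes_before_loop T2 (stack.dropLast ++ ((PySem.Dict.get? precedence node).getD []))
termination_by (stack.map pvWt).sum
decreasing_by
  obtain ⟨ys, rfl⟩ := List.getLast?_eq_some_iff.mp hs
  simp only [List.dropLast_concat, List.map_append, List.sum_append, List.map_cons,
    List.map_nil, List.sum_cons, List.sum_nil]
  have := pv_children_wt node
  omega

-- literal port of B: seed the stack with precedence.get(T1, []) and run the loop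
def goes_before_alt (T1 : String) (T2 : String) : Bool :=
  goes_before_loop T2 ((PySem.Dict.get? precedence T1).getD [])

-- ===== PRECONDITION & SPEC =====
def Spec_goes_before (T1 : String) (T2 : String) (out : Bool) : Prop := out = goes_before_alt T1 T2
instance (T1 : String) (T2 : String) (out : Bool) : Decidable (Spec_goes_before T1 T2 out) := by unfold Spec_goes_before; infer_instance

-- ===== CLAIM (what is proved, stated in full; the proofs are below) =====
def Claim_equal_goes_before : Prop := ∀ (T1 : String) (T2 : String), Dom_goes_before T1 T2 → Spec_goes_before T1 T2 (goes_before T1 T2)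

-- ===== LEMMAS AND PROOFS =====
theorem pv_get_none (T1 : String) (h1 : T1 ≠ "t1") (h2 : T1 ≠ "t2") (h3 : T1 ≠ "t3") :
    PySem.Dict.get? precedence T1 = none := by
  simp only [precedence, PySem.Dict.get?_mk_cons, beq_iff_eq]
  rw [if_neg (fun h => h1 h.symm), if_neg (fun h => h2 h.symm), if_neg (fun h => h3 h.symm)]
  rfl

theorem goes_before_none (T1 T2 : String) (h : PySem.Dict.get? precedence T1 = none) :
    goes_before T1 T2 = false := by
  rw [goes_before]; split <;> simp_all

-- on a stack of non-key nodes, B's loop is just a membership scan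
theorem loop_nonkeys (T2 : String) (stack : List String)
    (h : ∀ t ∈ stack, PySem.Dict.get? precedence t = none) :
    goes_before_loop T2 stack = stack.contains T2 := by
  induction stack using goes_before_loop.induct T2 with
  | case1 stack hs =>
    obtain rfl := List.getLast?_eq_none_iff.mp hs
    rw [goes_before_loop]
    split
    · rfl
    · next _ hs' => simp at hs'
  | case2 stack node hs hb =>
    rw [goes_before_loop]
    split
    · next hs' => rw [hs'] at hs; cases hs
    · next node' hs' =>
      rw [hs] at hs'; injection hs' with hs'; subst hs'
      simp only [hb, if_true]
      have hmem : node ∈ stack := List.mem_of_getLast? hs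
      have : T2 ∈ stack := by rwa [← (beq_iff_eq).mp hb]
      simp [List.contains_eq_mem, this]
  | case3 stack node hs hb ih =>
    obtain ⟨ys, rfl⟩ := List.getLast?_eq_some_iff.mp hs
    have hnode : PySem.Dict.get? precedence node = none := h node (by simp)
    rw [goes_before_loop]
    split
    · next hs' => rw [hs'] at hs; cases hs
    · next node' hs' =>
      rw [hs] at hs'; injection hs' with hs'; subst hs'
      simp only [hb]
      rw [List.dropLast_concat] at ih ⊢
      rw [hnode] at ih ⊢
      rw [ih (by intro t ht; exact h t (by simp at ht ⊢; exact Or.inl ht))]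
      have hne : T2 ≠ node := fun he => hb (by simp [he])
      simp [List.contains_eq_mem, List.mem_append, hne]

-- for a key with only non-key successors, A reduces to the direct membership test
theorem goes_before_key (T1 T2 : String) (lst : List String)
    (h : PySem.Dict.get? precedence T1 = some lst)
    (hch : ∀ t ∈ lst, PySem.Dict.get? precedence t = none) :
    goes_before T1 T2 = lst.contains T2 := by
  rw [goes_before]
  split
  · next lst' h' =>
    rw [h] at h'; injection h' with h'; subst h'
    by_cases hc : lst.contains T2 = true
    · rw [if_pos hc, hc]
    · rw [if_neg hc]
      have hc' : lst.contains T2 = false := by simpa using hc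
      rw [hc']
      simp only [List.any_eq_false, List.mem_attach, forall_const, Subtype.forall]
      intro t ht
      simp [goes_before_none t T2 (hch t ht)]
  · next h' => rw [h] at h'; cases h'

-- ===== VERDICT (by name: the statement is the Claim_ definition above) =====
theorem goes_before_spec : Claim_equal_goes_before := by
  intro T1 T2 _
  unfold Spec_goes_before goes_before_alt
  by_cases h1 : T1 = "t1"
  · subst h1
    rw [goes_before_key "t1" T2 ["t4", "t5"] (by decide) (by decide),
      (by decide : PySem.Dict.get? precedence "t1" = some ["t4", "t5"]),
      Option.getD_some, loop_nonkeys T2 ["t4", "t5"] (by decide)]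
  · by_cases h2 : T1 = "t2"
    · subst h2
      rw [goes_before_key "t2" T2 ["t4", "t5"] (by decide) (by decide),
        (by decide : PySem.Dict.get? precedence "t2" = some ["t4", "t5"]),
        Option.getD_some, loop_nonkeys T2 ["t4", "t5"] (by decide)]
    · by_cases h3 : T1 = "t3"
      · subst h3
        rw [goes_before_key "t3" T2 ["t5", "t6", "t7"] (by decide) (by decide),
          (by decide : PySem.Dict.get? precedence "t3" = some ["t5", "t6", "t7"]),
          Option.getD_some, loop_nonkeys T2 ["t5", "t6", "t7"] (by decide)]
      · have hn := pv_get_none T1 h1 h2 h3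
        rw [goes_before_none T1 T2 hn, hn, Option.getD_none,
          loop_nonkeys T2 [] (by intro t ht; cases ht)]
        rfl
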